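-- pv_equiv track=rewrite | github.com/sjmoon00/problem-solving | 프로그래머스/2/142085. 디펜스 게임/디펜스 게임.py | solution
-- ===== SOURCE A (Python) =====
-- import heapq as hq
--
-- def solution(n, k, enemy):
--     answer = 0
--     heap = []
--     for i, e in enumerate(enemy):
--         n -= e
--         hq.heappush(heap, -e)
--
--         if n < 0:
--             while k > 0 and n < 0:
--                 k -= 1
--                 ee = -hq.heappop(heap)
--                 n += ee
--
--         if n < 0:
--             break
--         answer = i + 1
--
--     return answer
-- ===== SOURCE B (Python) =====
-- def solution(n, k, enemy):
--     pool = []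
--     for i, e in enumerate(enemy):
--         n -= e
--         pool.append(e)
--         if n < 0:
--             pool.sort(reverse=True)
--             j = 0
--             prefix = 0
--             while j < k and j < len(pool) and n + prefix < 0:
--                 prefix += pool[j]
--                 j += 1
--             n += prefix
--             k -= j
--             pool = pool[j:]
--             if n < 0:
--                 return i
--     return len(enemy)
-- ===== Notes on version B (the rewrite author's own statement) =====
-- stated objective: alternative
-- what changed: Replaces A's negated-value min-heap and one-at-a-time lazy pop loop by an append-only pool that is sorted descending on demand at each deficit, spends the needed shields in one batch scan and slices them off, returning early instead of A's break-plus-answer accumulator; Pre_ excludes negative initial health n, on which A's pop loop can empty the heap and raise IndexError (on the n<0 inputs where A does return, B happens to agree).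
-- outside the precondition, e.g. on solution(-1, 0, [1]): A returns 0, B returns 0
import Mathlib
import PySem

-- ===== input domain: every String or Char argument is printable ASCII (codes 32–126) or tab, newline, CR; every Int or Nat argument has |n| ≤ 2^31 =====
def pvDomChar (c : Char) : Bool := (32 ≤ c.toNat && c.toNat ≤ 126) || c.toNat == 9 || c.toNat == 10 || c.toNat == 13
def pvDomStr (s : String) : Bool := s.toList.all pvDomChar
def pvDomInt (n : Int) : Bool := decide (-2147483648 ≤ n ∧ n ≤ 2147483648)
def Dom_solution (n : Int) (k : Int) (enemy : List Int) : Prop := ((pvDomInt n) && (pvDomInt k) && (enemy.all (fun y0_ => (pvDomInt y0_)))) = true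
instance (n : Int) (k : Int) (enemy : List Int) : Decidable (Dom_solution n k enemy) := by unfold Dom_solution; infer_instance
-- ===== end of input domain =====

-- B replaces A's negated-value min-heap and lazy one-at-a-time pops by an append-only pool,
-- sorted descending on demand at each deficit, spending shields in one batch scan (objective: alternative).


-- ===== PORT A =====
-- heapq is ported as a pop-min priority queue kept as an ascending sorted list: heappush =
-- sorted insert, heappop = take the head (the heap's internal array layout is not observable
-- in the result; exact for the pop-min contract heapq provides).
def hpushA (x : Int) : List Int → List Int
  | [] => [x]
  | y :: t => if x ≤ y then x :: y :: t else y :: hpushA x t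

-- the inner 'while k > 0 and n < 0' loop; on an empty heap Python's heappop raises IndexError
-- (those inputs are outside Pre_solution), here the loop state is returned unchanged
def popLoopA : Int → Int → List Int → Int × Int × List Int
  | k, n, [] => (k, n, [])
  | k, n, ee :: t => if 0 < k ∧ n < 0 then popLoopA (k - 1) (n + (-ee)) t else (k, n, ee :: t)

def goA : Int → Int → List Int → Int → Int → List Int → Int
  | _, _, _, answer, _, [] => answer
  | n, k, heap, answer, i, e :: rest =>
    let n1 := n - e
    let heap1 := hpushA (-e) heap
    let t3 := if n1 < 0 then popLoopA k n1 heap1 else (k, n1, heap1)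
    if t3.2.1 < 0 then answer else goA t3.2.1 t3.1 t3.2.2 (i + 1) (i + 1) rest

def solution (n : Int) (k : Int) (enemy : List Int) : Int := goA n k [] 0 0 enemy

-- ===== PORT B =====
-- the 'while j < k and j < len(pool) and n + pref < 0' scan over the descending-sorted pool
def spendB (k : Int) (n : Int) : List Int → Int → Int → Int × Int
  | [], j, pref => (j, pref)
  | x :: t, j, pref => if j < k ∧ n + pref < 0 then spendB k n t (j + 1) (pref + x) else (j, pref)

def goB : Int → Int → List Int → Int → List Int → Option Int
  | _, _, _, _, [] => none
  | n, k, pool, i, e :: rest =>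
    let n1 := n - e
    let pool1 := pool ++ [e]
    if n1 < 0 then
      let s := PySem.List.sorted pool1 (fun x => x) true
      let jp := spendB k n1 s 0 0
      let n2 := n1 + jp.2
      let k2 := k - jp.1
      let pool2 := PySem.List.slice s (some jp.1) none
      if n2 < 0 then some i else goB n2 k2 pool2 (i + 1) rest
    else goB n1 k pool1 (i + 1) rest

def solution_alt (n : Int) (k : Int) (enemy : List Int) : Int :=
  match goB n k [] 0 enemy with
  | some r => r
  | none => (enemy.length : Int)

-- ===== PRECONDITION & SPEC =====
-- Pre_ excludes negative initial health n: there A's pop loop can empty the heap and raise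
-- IndexError. A does return on some n < 0 inputs (e.g. k ≤ 0); those are excluded with the rest
-- because the raising set has no closed form (it depends on the whole trajectory).
def Pre_solution (n : Int) (k : Int) (enemy : List Int) : Prop := 0 ≤ n
instance (n : Int) (k : Int) (enemy : List Int) : Decidable (Pre_solution n k enemy) := by unfold Pre_solution; infer_instance
def pvWitness_solution : Int × Int × List Int := (5, 1, [2, 3])
def Spec_solution (n : Int) (k : Int) (enemy : List Int) (out : Int) : Prop := out = solution_alt n k enemy
instance (n : Int) (k : Int) (enemy : List Int) (out : Int) : Decidable (Spec_solution n k enemy out) := by unfold Spec_solution; infer_instance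

-- ===== CLAIM (what is proved, stated in full; the proofs are below) =====
def Claim_equal_solution : Prop := ∀ (n : Int) (k : Int) (enemy : List Int), Dom_solution n k enemy → Pre_solution n k enemy → Spec_solution n k enemy (solution n k enemy)

-- ===== LEMMAS AND PROOFS =====

theorem hpushA_eq_orderedInsert (x : Int) (h : List Int) :
    hpushA x h = List.orderedInsert (· ≤ ·) x h := by
  induction h with
  | nil => rfl
  | cons y t ih => simp [hpushA, List.orderedInsert, ih]

theorem hpushA_perm (x : Int) (h : List Int) : (hpushA x h).Perm (x :: h) := by
  rw [hpushA_eq_orderedInsert]; exact List.perm_orderedInsert _ x h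

theorem hpushA_pairwise (x : Int) (h : List Int) (hs : h.Pairwise (· ≤ ·)) :
    (hpushA x h).Pairwise (· ≤ ·) := by
  rw [hpushA_eq_orderedInsert]
  exact List.Pairwise.orderedInsert x h hs

-- the batch scan of B over the descending list equals A's one-at-a-time pop loop
theorem spend_pop (h : List Int) (k n : Int) : ∀ (j p : Int),
    ∃ m : ℕ,
      spendB k n (h.map (fun x => -x)) j p = (j + m, p + ((h.take m).map (fun x => -x)).sum) ∧
      popLoopA (k - j) (n + p) h = (k - j - m, (n + p) + ((h.take m).map (fun x => -x)).sum, h.drop m) := by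
  induction h with
  | nil =>
    intro j p
    exact ⟨0, by simp [spendB], by simp [popLoopA]⟩
  | cons h0 t ih =>
    intro j p
    by_cases hc : j < k ∧ n + p < 0
    · obtain ⟨m', h1, h2⟩ := ih (j + 1) (p + -h0)
      refine ⟨m' + 1, ?_, ?_⟩
      · simp only [List.map_cons, spendB, if_pos hc, h1, List.take_succ_cons, List.map_cons,
          List.sum_cons, Prod.mk.injEq]
        exact ⟨by push_cast; ring, by ring⟩
      · have hc' : 0 < k - j ∧ n + p < 0 := ⟨by omega, hc.2⟩
        have e2 : popLoopA (k - (j + 1)) (n + (p + -h0)) t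
            = (k - (j + 1) - m', (n + (p + -h0)) + ((t.take m').map (fun x => -x)).sum, t.drop m') := h2
        simp only [popLoopA, if_pos hc']
        have : k - j - 1 = k - (j + 1) := by ring
        rw [show k - j - 1 = k - (j+1) by ring, show n + p + -h0 = n + (p + -h0) by ring, e2]
        simp only [List.take_succ_cons, List.map_cons, List.sum_cons, List.drop_succ_cons,
          Prod.mk.injEq]
        exact ⟨by push_cast; ring, by ring, trivial⟩
    · refine ⟨0, ?_, ?_⟩
      · simp [spendB, if_neg hc]
      · have hc' : ¬ (0 < k - j ∧ n + p < 0) := by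
          intro ⟨a, b⟩; exact hc ⟨by omega, b⟩
        simp only [popLoopA, if_neg hc']
        simp

theorem neg_map_pairwise (h : List Int) (hs : h.Pairwise (· ≤ ·)) :
    (h.map (fun x => -x)).Pairwise (fun a b : Int => b ≤ a) := by
  rw [List.pairwise_map]
  exact hs.imp (by intro a b hab; omega)

theorem goAB (enemy : List Int) : ∀ (n k : Int) (heap pool : List Int) (i : Int),
    heap.Pairwise (· ≤ ·) →
    (heap.map (fun x => -x)).Perm pool →
    0 ≤ n + pool.sum →
    goA n k heap i i enemy = (match goB n k pool i enemy with
      | some r => r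
      | none => i + enemy.length) := by
  induction enemy with
  | nil => intro n k heap pool i _ _ _; simp [goA, goB]
  | cons e rest ih =>
    intro n k heap pool i hsort hperm hsum
    have hperm1 : ((hpushA (-e) heap).map (fun x => -x)).Perm (pool ++ [e]) := by
      have p1 : ((hpushA (-e) heap).map (fun x => -x)).Perm ((-e :: heap).map (fun x => -x)) :=
        (hpushA_perm (-e) heap).map _
      have p2 : ((-e : Int) :: heap).map (fun x => -x) = e :: heap.map (fun x => -x) := by simp
      exact (p1.trans (by rw [p2]; exact (hperm.cons e))).trans (List.perm_append_singleton e pool).symm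
    have hsort1 : (hpushA (-e) heap).Pairwise (· ≤ ·) := hpushA_pairwise _ _ hsort
    have hsum1 : (pool ++ [e]).sum = pool.sum + e := by simp
    by_cases hneg : n - e < 0
    · -- deficit branch
      -- the descending sort of the pool is exactly the negation of the sorted heap
      have hs_eq : PySem.List.sorted (pool ++ [e]) (fun x => x) true
          = (hpushA (-e) heap).map (fun x => -x) := by
        have hp : (PySem.List.sorted (pool ++ [e]) (fun x => x) true).Perm
            ((hpushA (-e) heap).map (fun x => -x)) :=
          (PySem.List.sorted_perm _ _ _).trans hperm1.symm
        have hs1 : (PySem.List.sorted (pool ++ [e]) (fun x => x) true).Pairwise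
            (fun a b : Int => b ≤ a) := by
          have := PySem.List.sorted_pairwise_rev (xs := pool ++ [e]) (key := fun x => x)
          exact this
        have hs2 := neg_map_pairwise _ hsort1
        exact List.Perm.eq_of_pairwise (fun a b _ _ h1 h2 => le_antisymm h2 h1) hs1 hs2 hp
      obtain ⟨m, hspend, hpop⟩ := spend_pop (hpushA (-e) heap) k (n - e) 0 0
      have hspend' : spendB k (n - e) (PySem.List.sorted (pool ++ [e]) (fun x => x) true) 0 0
          = ((m : Int), (((hpushA (-e) heap).take m).map (fun x => -x)).sum) := by
        rw [hs_eq]; rw [hspend]; simp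
      have hpop' : popLoopA k (n - e) (hpushA (-e) heap)
          = (k - m, (n - e) + (((hpushA (-e) heap).take m).map (fun x => -x)).sum,
             (hpushA (-e) heap).drop m) := by
        have := hpop
        simpa using this
      -- unfold both sides
      show goA n k heap i i (e :: rest) = _
      rw [goA, goB]
      simp only [if_pos hneg, hpop', hspend']
      have hslice : PySem.List.slice (PySem.List.sorted (pool ++ [e]) (fun x => x) true)
          (some (m : Int)) none = (((hpushA (-e) heap)).map (fun x => -x)).drop m := by
        rw [PySem.List.slice_from _ (by positivity), hs_eq]
        simp
      set S := (((hpushA (-e) heap).take m).map (fun x => -x)).sum with hS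
      by_cases hfail : n - e + S < 0
      · simp only [hslice, if_pos hfail]
      · simp only [hslice, if_neg hfail]
        -- recurse
        have hsort2 : ((hpushA (-e) heap).drop m).Pairwise (· ≤ ·) :=
          hsort1.sublist (List.drop_sublist m _)
        have hperm2 : (((hpushA (-e) heap).drop m).map (fun x => -x)).Perm
            ((hpushA (-e) heap).map (fun x => -x) |>.drop m) := by
          rw [List.map_drop]
        
        have hsum2 : 0 ≤ (n - e + S) + (((hpushA (-e) heap).map (fun x => -x)).drop m).sum := by
          have htot : (((hpushA (-e) heap).map (fun x => -x))).sum = (pool ++ [e]).sum :=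
            hperm1.sum_eq
          have hsplit : (((hpushA (-e) heap).map (fun x => -x))).sum
              = S + (((hpushA (-e) heap).map (fun x => -x)).drop m).sum := by
            rw [hS, List.map_take, ← List.sum_append, List.take_append_drop]
          have : (pool ++ [e]).sum = pool.sum + e := hsum1
          omega
        have := ih (n - e + S) (k - m) ((hpushA (-e) heap).drop m)
          (((hpushA (-e) heap).map (fun x => -x)).drop m) (i + 1) hsort2 hperm2 hsum2
        rw [this]
        cases goB (n - e + S) (k - ↑m) (((hpushA (-e) heap).map (fun x => -x)).drop m) (i + 1) rest with
        | none => simp; ring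
        | some r => simp
    · -- no deficit
      show goA n k heap i i (e :: rest) = _
      rw [goA, goB]
      simp only [if_neg hneg]
      have hsum2 : 0 ≤ (n - e) + (pool ++ [e]).sum := by
        rw [hsum1]; omega
      have := ih (n - e) k (hpushA (-e) heap) (pool ++ [e]) (i + 1) hsort1 hperm1 hsum2
      rw [this]
      cases goB (n - e) k (pool ++ [e]) (i + 1) rest with
      | none => simp; ring
      | some r => simp

-- ===== VERDICT (by name: the statement is the Claim_ definition above) =====
theorem solution_spec : Claim_equal_solution := by
  intro n k enemy _ hpre
  unfold Spec_solution solution solution_alt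
  have := goAB enemy n k [] [] 0 (by simp) (by simp) (by simpa using hpre)
  rw [this]
  cases goB n k [] 0 enemy with
  | none => simp
  | some r => simp
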